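-- pv_equiv track=rewrite | github.com/yejunedev/coding_test | 프로그래머스/0/181890. 왼쪽 오른쪽/왼쪽 오른쪽.py | solution
-- ===== SOURCE A (Python) =====
-- def solution(str_list):
--     answer = []
--     n = len(str_list)
--     for i in range(n):
--         if str_list[i]=="l":
--             answer = str_list[:i]
--             break
--         if str_list[i]=="r":
--             answer = str_list[i+1:]
--             break
--     return answer
-- ===== SOURCE B (Python) =====
-- def solution(str_list):
--     n = len(str_list)
--     try:
--         li = str_list.index("l")
--     except ValueError:
--         li = n
--     try:
--         ri = str_list.index("r")
--     except ValueError: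
--         ri = n
--     if li < ri:
--         return str_list[:li]
--     if ri < li:
--         return str_list[ri + 1:]
--     return []
-- ===== Notes on version B (the rewrite author's own statement) =====
-- stated objective: idiomatic
-- what changed: Replaced the single early-breaking indexed scan with two independent list.index lookups (missing letter mapped to len sentinel) followed by one comparison that picks the prefix or suffix.
import Mathlib
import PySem

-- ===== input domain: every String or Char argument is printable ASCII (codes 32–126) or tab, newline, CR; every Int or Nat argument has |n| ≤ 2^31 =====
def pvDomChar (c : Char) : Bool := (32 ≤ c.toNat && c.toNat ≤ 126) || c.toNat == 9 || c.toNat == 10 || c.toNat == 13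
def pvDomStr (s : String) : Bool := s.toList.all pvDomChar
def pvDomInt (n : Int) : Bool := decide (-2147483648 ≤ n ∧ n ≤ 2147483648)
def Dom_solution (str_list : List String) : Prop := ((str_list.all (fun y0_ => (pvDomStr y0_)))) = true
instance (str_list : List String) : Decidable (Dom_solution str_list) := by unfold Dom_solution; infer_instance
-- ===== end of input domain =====

-- B replaces A's single early-breaking indexed scan with two independent index lookups
-- (missing letter → length sentinel) and one comparison (objective: idiomatic).


-- ===== PORT A =====
-- the loop 'for i in range(n): if xs[i]=="l": answer=xs[:i]; break; if xs[i]=="r": answer=xs[i+1:]; break'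
-- as structural recursion over the remaining suffix, carrying the current index i
-- (xs[:i] = take i, xs[i+1:] = drop (i+1): exact for these in-range nonnegative slice bounds)
def solutionGo (full : List String) (i : Nat) : List String → List String
  | [] => []
  | x :: rest =>
      if x = "l" then full.take i
      else if x = "r" then full.drop (i + 1)
      else solutionGo full (i + 1) rest

def solution (str_list : List String) : List String :=
  solutionGo str_list 0 str_list

-- ===== PORT B =====
-- str_list.index("l") with the except branch substituting n = len(str_list)
def solutionAltIdx (xs : List String) (v : String) : Nat :=
  (PySem.List.index? xs v).getD xs.length

def solution_alt (str_list : List String) : List String :=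
  let li := solutionAltIdx str_list "l"
  let ri := solutionAltIdx str_list "r"
  if li < ri then str_list.take li
  else if ri < li then str_list.drop (ri + 1)
  else []

-- ===== PRECONDITION & SPEC =====
def Spec_solution (str_list : List String) (out : List String) : Prop := out = solution_alt str_list
instance (str_list : List String) (out : List String) : Decidable (Spec_solution str_list out) := by unfold Spec_solution; infer_instance

-- ===== CLAIM (what is proved, stated in full; the proofs are below) =====
def Claim_equal_solution : Prop := ∀ (str_list : List String), Dom_solution str_list → Spec_solution str_list (solution str_list)

-- ===== LEMMAS AND PROOFS =====

lemma solutionAltIdx_nil (v : String) : solutionAltIdx [] v = 0 := by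
  simp [solutionAltIdx]

lemma solutionAltIdx_cons_self (xs : List String) (v : String) :
    solutionAltIdx (v :: xs) v = 0 := by
  simp [solutionAltIdx, List.idxOf?_cons]

lemma solutionAltIdx_cons_of_ne (x : String) (xs : List String) (v : String) (h : x ≠ v) :
    solutionAltIdx (x :: xs) v = solutionAltIdx xs v + 1 := by
  simp only [solutionAltIdx, PySem.List.index?_eq_idxOf?, List.length_cons]
  cases hidx : List.idxOf? v xs <;> simp [List.idxOf?_cons, hidx, h]

-- invariant of A's scan: from index i on the suffix, the result is B's formula shifted by i
lemma solutionGo_spec (rest : List String) : ∀ (full : List String) (i : Nat),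
    solutionGo full i rest =
      (let li := solutionAltIdx rest "l"
       let ri := solutionAltIdx rest "r"
       if li < ri then full.take (i + li)
       else if ri < li then full.drop (i + ri + 1)
       else []) := by
  induction rest with
  | nil => intro full i; simp [solutionGo, solutionAltIdx_nil]
  | cons x t ih =>
      intro full i
      by_cases hl : x = "l"
      · subst hl
        have hr : ("l" : String) ≠ "r" := by decide
        simp [solutionGo, solutionAltIdx_cons_self, solutionAltIdx_cons_of_ne _ _ _ hr]
      · by_cases hr : x = "r"
        · subst hr
          have hl' : ("r" : String) ≠ "l" := by decide
          simp [solutionGo, solutionAltIdx_cons_self, solutionAltIdx_cons_of_ne _ _ _ hl']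
        · simp only [solutionGo, if_neg hl, if_neg hr, ih full (i + 1),
            solutionAltIdx_cons_of_ne _ _ _ hl, solutionAltIdx_cons_of_ne _ _ _ hr]
          have e1 : i + 1 + solutionAltIdx t "l" = i + (solutionAltIdx t "l" + 1) := by omega
          have e2 : i + 1 + solutionAltIdx t "r" + 1 = i + (solutionAltIdx t "r" + 1) + 1 := by omega
          simp only [e1, e2, Nat.add_lt_add_iff_right]

-- ===== VERDICT (by name: the statement is the Claim_ definition above) =====
theorem solution_spec : Claim_equal_solution := by
  intro xs _
  unfold Spec_solution solution solution_alt
  rw [solutionGo_spec]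
  simp
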